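-- pv_equiv track=rewrite | github.com/goronc/Projet-Enigma | vigenere.py | dechiffrer
-- ===== SOURCE A (Python) =====
-- def dechiffrer(chaine,cle,alphabet):
--     """Cette fonction renvoie la chaine déchiffrer en fonction de la cle
--
--
--     Parameter
--     ---------
--     chaine : string
--                 chaine à chiffrer
--     cle : int
--                 la cle secrete
--     cle : int
--                 alphabet de reference
--
--     Returns
--     -------
--     string
--         chaine chiffrer
--
--     Examples
--     --------
--     >>> chiffrer("sswwc hzfwo", "lol")
--     "hello world"
--
--     """
--     res = ""
--     j = 0
--     for i in range(len(chaine)):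
--         if chaine[i] == " ":
--             res += " "
--         else:
--             decalage = alphabet.index(chaine[i]) - alphabet.index(cle[j % len(cle)])
--             res += alphabet[decalage % len(alphabet)]
--             j += 1
--     return res
-- ===== SOURCE B (Python) =====
-- def dechiffrer(chaine, cle, alphabet):
--     letters = [alphabet[(alphabet.index(c) - alphabet.index(cle[k % len(cle)])) % len(alphabet)]
--                for k, c in enumerate(ch for ch in chaine if ch != " ")]
--     it = iter(letters)
--     return "".join(" " if c == " " else next(it) for c in chaine)
-- ===== Notes on version B (the rewrite author's own statement) =====
-- stated objective: idiomatic
-- what changed: Replaces the single interleaved loop with manual counter j by two passes: a comprehension eagerly decrypting the non-space characters with their rank as key index, then a join that walks the string again, emitting spaces and consuming the decrypted letters from an iterator.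
import Mathlib
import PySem

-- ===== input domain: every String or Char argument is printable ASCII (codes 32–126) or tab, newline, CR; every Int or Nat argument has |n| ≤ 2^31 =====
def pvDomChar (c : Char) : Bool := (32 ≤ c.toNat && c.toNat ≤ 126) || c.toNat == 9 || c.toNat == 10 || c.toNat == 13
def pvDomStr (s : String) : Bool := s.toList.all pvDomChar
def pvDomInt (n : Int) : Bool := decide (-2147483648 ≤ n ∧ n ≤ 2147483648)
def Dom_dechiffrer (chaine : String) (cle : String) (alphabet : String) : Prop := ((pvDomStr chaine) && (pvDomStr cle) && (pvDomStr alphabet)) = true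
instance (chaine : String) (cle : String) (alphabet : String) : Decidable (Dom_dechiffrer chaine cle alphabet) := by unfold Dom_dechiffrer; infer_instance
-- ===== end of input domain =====

-- B rewrites A's single interleaved loop (manual key counter j) as two passes: decrypt the
-- non-space characters by rank, then merge them back over the spaces; idiomatic, same cost.
-- Shared helper: the per-letter decryption both Pythons write as
-- alphabet[(alphabet.index(c) - alphabet.index(cle[j % len(cle)])) % len(alphabet)]
-- (the .getD fallbacks are never used inside Pre_, where every index/getitem succeeds).
def pvDec (as ks : List Char) (j : Int) (c : Char) : Char :=
  let ki : Int := if ks.length = 0 then 0 else PySem.Int.mod j (ks.length : Int)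
  let kc : Char := (PySem.List.pyGet? ks ki).getD ' '
  let d : Int := ((PySem.List.index? as c).getD 0) - ((PySem.List.index? as kc).getD 0)
  (PySem.List.pyGet? as (PySem.Int.mod d (as.length : Int))).getD ' '

-- ===== PORT A =====
def dechiffrer (chaine : String) (cle : String) (alphabet : String) : String :=
  let cs := chaine.toList
  let st := (PySem.List.pyRange 0 (cs.length : Int) 1).foldl
    (fun (st : List Char × Int) i =>
      let c := PySem.List.pyGetD cs i ' '
      if c = ' ' then (st.1 ++ [' '], st.2)
      else (st.1 ++ [pvDec alphabet.toList cle.toList st.2 c], st.2 + 1))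
    ([], 0)
  String.ofList st.1

-- ===== PORT B =====
-- second pass of B: a space for each space, else pop the next decrypted letter
-- (the [] case in the non-space branch is unreachable: the letters list has one
-- entry per non-space character)
def pvMerge : List Char → List Char → List Char
  | [], _ => []
  | c :: cs, ds =>
    if c = ' ' then ' ' :: pvMerge cs ds
    else match ds with
      | [] => []
      | d :: ds' => d :: pvMerge cs ds'

def dechiffrer_alt (chaine : String) (cle : String) (alphabet : String) : String :=
  let letters := (PySem.List.enumerate (chaine.toList.filter (fun c => c ≠ ' '))).map
    (fun kc => pvDec alphabet.toList cle.toList kc.1 kc.2)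
  String.ofList (pvMerge chaine.toList letters)

-- ===== PRECONDITION & SPEC =====
-- Pre_ excludes exactly the inputs where Python A raises: a non-space character of chaine
-- missing from alphabet (ValueError), a used key character (rank < number of non-space
-- characters) missing from alphabet (ValueError), or an empty cle with a non-space
-- character present (ZeroDivisionError).
def Pre_dechiffrer (chaine : String) (cle : String) (alphabet : String) : Prop :=
  ((chaine.toList.filter (fun c => c ≠ ' ')).all (fun c => alphabet.toList.contains c)
    && (cle.toList.take (chaine.toList.filter (fun c => c ≠ ' ')).length).all
        (fun c => alphabet.toList.contains c)
    && (chaine.toList.filter (fun c => c ≠ ' ') == [] || cle.toList != [])) = true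
instance (chaine : String) (cle : String) (alphabet : String) : Decidable (Pre_dechiffrer chaine cle alphabet) := by unfold Pre_dechiffrer; infer_instance

def pvWitness_dechiffrer : String × String × String := ("ba c", "ab", "abc")

def Spec_dechiffrer (chaine : String) (cle : String) (alphabet : String) (out : String) : Prop := out = dechiffrer_alt chaine cle alphabet
instance (chaine : String) (cle : String) (alphabet : String) (out : String) : Decidable (Spec_dechiffrer chaine cle alphabet out) := by unfold Spec_dechiffrer; infer_instance

-- ===== CLAIM (what is proved, stated in full; the proofs are below) =====
def Claim_equal_dechiffrer : Prop := ∀ (chaine : String) (cle : String) (alphabet : String), Dom_dechiffrer chaine cle alphabet → Pre_dechiffrer chaine cle alphabet → Spec_dechiffrer chaine cle alphabet (dechiffrer chaine cle alphabet)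

-- ===== LEMMAS AND PROOFS =====

-- A's loop, started at accumulator acc and key counter j, produces exactly acc followed by
-- B's merge of the rank-decrypted non-space letters (ranks starting at j).
lemma pv_key (as ks : List Char) : ∀ (cs : List Char) (acc : List Char) (j : Int),
    cs.foldl
      (fun (st : List Char × Int) c =>
        if c = ' ' then (st.1 ++ [' '], st.2)
        else (st.1 ++ [pvDec as ks st.2 c], st.2 + 1))
      (acc, j)
    = (acc ++ pvMerge cs ((PySem.List.enumerate (cs.filter (fun c => c ≠ ' ')) j).map
        (fun kc => pvDec as ks kc.1 kc.2)),
       j + ((cs.filter (fun c => c ≠ ' ')).length : Int)) := by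
  intro cs
  induction cs with
  | nil => intro acc j; simp [pvMerge]
  | cons c cs ih =>
    intro acc j
    simp only [List.foldl_cons]
    by_cases hc : c = ' '
    · rw [if_pos hc, ih]
      simp [pvMerge, hc]
    · rw [if_neg hc, ih]
      simp only [List.filter_cons, hc, ne_eq, not_false_eq_true, decide_true, if_true,
        PySem.List.enumerate_cons, List.map_cons, pvMerge, List.length_cons,
        Prod.mk.injEq]
      refine ⟨by simp, by push_cast; ring⟩

-- ===== VERDICT (by name: the statement is the Claim_ definition above) =====
theorem dechiffrer_spec : Claim_equal_dechiffrer := by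
  intro chaine cle alphabet _ _
  unfold Spec_dechiffrer
  simp only [dechiffrer, dechiffrer_alt]
  rw [PySem.List.foldl_pyRange_zero_pyGetD' chaine.toList ' '
    (fun st c => if c = ' ' then (st.1 ++ [' '], st.2)
      else (st.1 ++ [pvDec alphabet.toList cle.toList st.2 c], st.2 + 1)) ([], 0)]
  rw [pv_key]
  simp
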